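-- pv_equiv track=rewrite | github.com/kbvanzomeren/AoC | 2023/day_08.py | least_common_of_min
-- ===== SOURCE A (Python) =====
-- from itertools import product
--
-- def get_least_common(x, y):
--     if x > y:
--         _min, _max = x, y
--         current = x
--     else:
--         _min, _max = y, x
--         current = y
--
--     while True:
--         while True:
--             if current % _min == 0:
--                 break
--             else:
--                 current += 1
--
--         if current % x == 0 and current % y == 0:
--             return current
--         current += _min
--
-- def least_common_of_min(all_possibilities):
--     all_combinations = list(product(*all_possibilities))
--
--     _min_steps = None
--     for option in all_combinations:
--         result = 1
--         for steps in option: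
--             result = get_least_common(result, steps)
--         if _min_steps is None or result < _min_steps:
--             _min_steps = result
--     return _min_steps
-- ===== SOURCE B (Python) =====
-- def _lcm(a, b):
--     a, b = abs(a), abs(b)
--     x, y = a, b
--     while y:
--         x, y = y, x % y
--     return a // x * b if x else 0
--
--
-- def least_common_of_min(all_possibilities):
--     reachable = {1}
--     for options in all_possibilities:
--         reachable = {_lcm(c, s) for c in reachable for s in options}
--         if not reachable:
--             return None
--     return min(reachable)
-- ===== Notes on version B (the rewrite author's own statement) =====
-- stated objective: faster
-- what changed: B replaces A's fold over the full cartesian product (with an increment-and-test LCM search) by a per-dimension set of reachable LCM values built with a gcd-based lcm helper, then takes the min of that set.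
import Mathlib
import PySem

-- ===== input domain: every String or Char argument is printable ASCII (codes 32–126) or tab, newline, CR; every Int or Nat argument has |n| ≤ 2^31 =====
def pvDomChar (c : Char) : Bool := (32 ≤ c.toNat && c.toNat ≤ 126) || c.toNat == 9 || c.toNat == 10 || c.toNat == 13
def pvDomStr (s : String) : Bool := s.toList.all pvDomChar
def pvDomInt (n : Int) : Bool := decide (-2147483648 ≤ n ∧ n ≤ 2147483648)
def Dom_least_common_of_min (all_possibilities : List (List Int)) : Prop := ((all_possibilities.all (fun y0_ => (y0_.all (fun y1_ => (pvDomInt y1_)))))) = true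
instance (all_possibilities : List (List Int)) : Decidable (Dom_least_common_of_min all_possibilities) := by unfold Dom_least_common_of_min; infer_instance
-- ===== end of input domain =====

-- B replaces A's exhaustive fold over the full cartesian product (with a search-by-increment LCM)
-- by a per-dimension reachable-LCM set built with a gcd-based lcm; objective: faster.

-- ===== PORT A =====
-- inner 'while True: if current % _min == 0: break else current += 1' (fuel is only a totality guard)
def glcInner (cur m : Int) : Nat → Int
  | 0 => cur
  | f + 1 => if PySem.Int.mod cur m = 0 then cur else glcInner (cur + 1) m f

-- outer 'while True: … if current % x == 0 and current % y == 0: return current; current += _min'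
def glcOuter (x y m cur : Int) : Nat → Int
  | 0 => cur
  | f + 1 =>
    let c := glcInner cur m (m.natAbs + 1)
    if PySem.Int.mod c x = 0 ∧ PySem.Int.mod c y = 0 then c
    else glcOuter x y m (c + m) f

def get_least_common (x y : Int) : Int :=
  if x > y then glcOuter x y x x (x.natAbs * y.natAbs + 1)
  else glcOuter x y y y (x.natAbs * y.natAbs + 1)

-- list(product(*all_possibilities)), itertools order (rightmost varies fastest)
def pyProduct : List (List Int) → List (List Int)
  | [] => [[]]
  | l :: rest => l.flatMap (fun v => (pyProduct rest).map (fun t => v :: t))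

def least_common_of_min (all_possibilities : List (List Int)) : Option Int :=
  let all_combinations := pyProduct all_possibilities
  all_combinations.foldl
    (fun _min_steps option =>
      let result := option.foldl (fun result steps => get_least_common result steps) 1
      match _min_steps with
      | none => some result
      | some m => if result < m then some result else some m)
    none

-- ===== PORT B =====
-- B's hand-written Euclid 'while y: x, y = y, x % y' runs on abs values, so on Nat it is exact
def altGcdNatF : Nat → Nat → Nat → Nat
  | 0, x, _ => x
  | f + 1, x, y => if y = 0 then x else altGcdNatF f y (x % y)

def altGcdNat (x y : Nat) : Nat := altGcdNatF (y + 1) x y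

def altLcm (a b : Int) : Int :=
  let a' : Nat := a.natAbs
  let b' : Nat := b.natAbs
  let x : Nat := altGcdNat a' b'
  if x = 0 then 0 else PySem.Int.floordiv (a' : Int) (x : Int) * (b' : Int)

def altGo (reachable : PySem.Set Int) : List (List Int) → Option Int
  | [] => PySem.List.min? reachable (fun v => v)
  | opts :: rest =>
    let r' := PySem.Set.ofList (reachable.flatMap (fun c => opts.map (fun s => altLcm c s)))
    if r' = [] then none else altGo r' rest

def least_common_of_min_alt (all_possibilities : List (List Int)) : Option Int :=
  altGo (PySem.Set.ofList [1]) all_possibilities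

-- ===== PRECONDITION & SPEC =====
-- Pre_ excludes exactly the inputs where A raises ZeroDivisionError: all option lists nonempty
-- (so the product is nonempty) and some list contains 0 (so some combination divides by 0).
def Pre_least_common_of_min (all_possibilities : List (List Int)) : Prop :=
  (∃ l ∈ all_possibilities, l = []) ∨ (∀ l ∈ all_possibilities, ∀ s ∈ l, s ≠ 0)
instance (all_possibilities : List (List Int)) : Decidable (Pre_least_common_of_min all_possibilities) := by unfold Pre_least_common_of_min; infer_instance

def pvWitness_least_common_of_min : List (List Int) := [[2, 3], [4]]

def Spec_least_common_of_min (all_possibilities : List (List Int)) (out : Option Int) : Prop := out = least_common_of_min_alt all_possibilities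
instance (all_possibilities : List (List Int)) (out : Option Int) : Decidable (Spec_least_common_of_min all_possibilities out) := by unfold Spec_least_common_of_min; infer_instance

-- ===== CLAIM (what is proved, stated in full; the proofs are below) =====
def Claim_equal_least_common_of_min : Prop := ∀ (all_possibilities : List (List Int)), Dom_least_common_of_min all_possibilities → Pre_least_common_of_min all_possibilities → Spec_least_common_of_min all_possibilities (least_common_of_min all_possibilities)

-- ===== LEMMAS AND PROOFS =====

-- abbreviation used only in proofs: integer lcm as an Int-valued binary operation
def lcmI (a b : Int) : Int := (Int.lcm a b : Int)

theorem lcmI_pos {a b : Int} (ha : a ≠ 0) (hb : b ≠ 0) : 0 < lcmI a b := by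
  have : Int.lcm a b ≠ 0 := Nat.lcm_ne_zero (by simpa using ha) (by simpa using hb)
  unfold lcmI
  exact_mod_cast Nat.pos_of_ne_zero this

theorem glcInner_of_dvd {cur m : Int} (h : m ∣ cur) (f : Nat) :
    glcInner cur m (f + 1) = cur := by
  simp [glcInner, (PySem.Int.mod_eq_zero_iff_dvd cur m).mpr h]

theorem glcOuter_eq (x y m : Int) (hm : 0 < m) (hmL : m ∣ lcmI x y) :
    ∀ (fuel : Nat) (cur : Int), m ∣ cur → 0 < cur → cur ≤ lcmI x y →
      lcmI x y - cur < (fuel : Int) * m → glcOuter x y m cur fuel = lcmI x y := by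
  intro fuel
  induction fuel with
  | zero => intro cur _ _ hle hlt; simp at hlt; omega
  | succ f ih =>
    intro cur hdvd hpos hle hlt
    rw [glcOuter]
    simp only [glcInner_of_dvd hdvd]
    by_cases hc : PySem.Int.mod cur x = 0 ∧ PySem.Int.mod cur y = 0
    · rw [if_pos hc]
      have hxc : x ∣ cur := (PySem.Int.mod_eq_zero_iff_dvd cur x).mp hc.1
      have hyc : y ∣ cur := (PySem.Int.mod_eq_zero_iff_dvd cur y).mp hc.2
      have hdL : lcmI x y ∣ cur := Int.coe_lcm_dvd hxc hyc
      have := Int.le_of_dvd hpos hdL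
      omega
    · rw [if_neg hc]
      have hne : cur ≠ lcmI x y := by
        intro h
        exact hc ⟨(PySem.Int.mod_eq_zero_iff_dvd cur x).mpr (h ▸ Int.dvd_lcm_left x y),
                  (PySem.Int.mod_eq_zero_iff_dvd cur y).mpr (h ▸ Int.dvd_lcm_right x y)⟩
      have hlt' : cur < lcmI x y := lt_of_le_of_ne hle hne
      have hstep : cur + m ≤ lcmI x y := by
        have hd : m ∣ (lcmI x y - cur) := Dvd.dvd.sub hmL hdvd
        have := Int.le_of_dvd (by omega) hd
        omega
      apply ih (cur + m) (Dvd.dvd.add hdvd dvd_rfl) (by omega) hstep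
      have : ((f : Int) + 1) * m = (f : Int) * m + m := by ring
      push_cast at hlt ⊢
      omega

theorem glc_eq (x y : Int) (hx : 0 < x) (hy : y ≠ 0) :
    get_least_common x y = lcmI x y := by
  have hx0 : x ≠ 0 := by omega
  have hLpos : 0 < lcmI x y := lcmI_pos hx0 hy
  have hLle : lcmI x y ≤ |x| * |y| := by
    have hdvd : lcmI x y ∣ x * y := Int.coe_lcm_dvd (Dvd.intro _ rfl) (Dvd.intro_left _ rfl)
    have h2 := Int.le_of_dvd (abs_pos.mpr (mul_ne_zero hx0 hy)) ((dvd_abs _ _).mpr hdvd)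
    calc lcmI x y ≤ |x * y| := h2
      _ = |x| * |y| := abs_mul x y
  unfold get_least_common
  by_cases hxy : x > y
  · rw [if_pos hxy]
    apply glcOuter_eq x y x hx (Int.dvd_lcm_left x y) _ x dvd_rfl hx
      (Int.le_of_dvd hLpos (Int.dvd_lcm_left x y))
    push_cast [Nat.cast_natAbs]
    nlinarith [abs_pos.mpr hx0, abs_pos.mpr hy]
  · rw [if_neg hxy]
    have hy' : 0 < y := by omega
    apply glcOuter_eq x y y hy' (Int.dvd_lcm_right x y) _ y dvd_rfl hy'
      (Int.le_of_dvd hLpos (Int.dvd_lcm_right x y))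
    push_cast [Nat.cast_natAbs]
    nlinarith [abs_pos.mpr hx0, abs_pos.mpr hy]

-- A's inner fold over an option equals the lcm fold, and stays positive
theorem fold_glc_eq : ∀ (o : List Int), (∀ s ∈ o, s ≠ 0) → ∀ r : Int, 0 < r →
    o.foldl (fun result steps => get_least_common result steps) r = o.foldl lcmI r ∧
    0 < o.foldl lcmI r := by
  intro o
  induction o with
  | nil => intro _ r hr; simpa using hr
  | cons s t ih =>
    intro hz r hr
    have hs : s ≠ 0 := hz s (by simp)
    have h1 : get_least_common r s = lcmI r s := glc_eq r s hr hs
    have h2 := ih (fun u hu => hz u (by simp [hu])) (lcmI r s) (lcmI_pos (by omega) hs)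
    simpa [h1] using h2

-- B's _lcm helper computes lcmI
theorem altGcdNatF_eq : ∀ (f x y : Nat), y < f → altGcdNatF f x y = Nat.gcd x y := by
  intro f
  induction f with
  | zero => intro x y h; omega
  | succ f ih =>
    intro x y h
    rw [altGcdNatF]
    by_cases h0 : y = 0
    · simp [h0]
    · rw [if_neg h0, ih y (x % y) (by
        have := Nat.mod_lt x (Nat.pos_of_ne_zero h0); omega),
        Nat.gcd_comm y, ← Nat.gcd_rec, Nat.gcd_comm]

theorem altGcdNat_eq (x y : Nat) : altGcdNat x y = Nat.gcd x y :=
  altGcdNatF_eq (y + 1) x y (by omega)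

theorem altLcm_eq (a b : Int) : altLcm a b = lcmI a b := by
  show (if altGcdNat a.natAbs b.natAbs = 0 then (0 : Int)
      else PySem.Int.floordiv (a.natAbs : Int) ((altGcdNat a.natAbs b.natAbs : Nat) : Int)
        * (b.natAbs : Int)) = lcmI a b
  unfold lcmI Int.lcm
  rw [altGcdNat_eq]
  by_cases h : Nat.gcd a.natAbs b.natAbs = 0
  · rw [if_pos h]
    simp [Nat.lcm, Nat.eq_zero_of_gcd_eq_zero_left h, Nat.eq_zero_of_gcd_eq_zero_right h]
  · rw [if_neg h]
    rw [PySem.Int.floordiv_natCast]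
    have : a.natAbs / Nat.gcd a.natAbs b.natAbs * b.natAbs = Nat.lcm a.natAbs b.natAbs :=
      Nat.div_mul_right_comm (Nat.gcd_dvd_left _ _) _
    exact_mod_cast this

-- every element of a combination comes from one of the option lists
theorem mem_of_mem_pyProduct : ∀ (aps : List (List Int)) (o : List Int), o ∈ pyProduct aps →
    ∀ s ∈ o, ∃ l ∈ aps, s ∈ l := by
  intro aps
  induction aps with
  | nil => intro o ho; simp [pyProduct] at ho; simp [ho]
  | cons l rest ih =>
    intro o ho s hs
    simp only [pyProduct, List.mem_flatMap, List.mem_map] at ho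
    obtain ⟨v, hv, t, ht, rfl⟩ := ho
    rcases List.mem_cons.mp hs with rfl | hs'
    · exact ⟨l, by simp, hv⟩
    · obtain ⟨l', hl', hsl'⟩ := ih t ht s (by simpa using hs')
      exact ⟨l', by simp [hl'], hsl'⟩

theorem pyProduct_ne_nil : ∀ (aps : List (List Int)), (∀ l ∈ aps, l ≠ []) →
    pyProduct aps ≠ [] := by
  intro aps
  induction aps with
  | nil => intro _; simp [pyProduct]
  | cons l rest ih =>
    intro h
    have hl : l ≠ [] := h l (by simp)
    have hr := ih (fun u hu => h u (by simp [hu]))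
    simp only [pyProduct, ne_eq, List.flatMap_eq_nil_iff, not_forall]
    obtain ⟨v, hv⟩ := List.exists_mem_of_ne_nil l hl
    exact ⟨v, hv, by simp [hr]⟩

theorem pyProduct_nil_of_mem_nil : ∀ (aps : List (List Int)), (∃ l ∈ aps, l = []) →
    pyProduct aps = [] := by
  intro aps
  induction aps with
  | nil => simp
  | cons l rest ih =>
    intro ⟨l', hl', he⟩
    rcases List.mem_cons.mp hl' with rfl | hmem
    · simp [pyProduct, he]
    · simp [pyProduct, ih ⟨l', hmem, he⟩]

-- A's running-minimum fold
theorem foldMin_some : ∀ (rs : List Int) (m : Int),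
    rs.foldl (fun acc r => match acc with
      | none => some r
      | some m => if r < m then some r else some m) (some m)
    = some (rs.foldl min m) := by
  intro rs
  induction rs with
  | nil => intro m; rfl
  | cons r t ih =>
    intro m
    have : (if r < m then some r else some m) = some (min m r) := by
      rcases le_or_gt m r with h | h
      · rw [if_neg (by omega), min_eq_left h]
      · rw [if_pos h, min_eq_right (by omega)]
    simpa [this] using ih (min m r)

-- B never hands min? an empty set on the paths we reach; if some options list is empty, B returns none
theorem altGo_none_of_mem_nil : ∀ (aps : List (List Int)) (r : PySem.Set Int),
    (∃ l ∈ aps, l = []) → altGo r aps = none := by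
  intro aps
  induction aps with
  | nil => intro r h; simp at h
  | cons opts rest ih =>
    intro r ⟨l', hl', he⟩
    rcases List.mem_cons.mp hl' with rfl | hmem
    · subst he
      have h0 : (r.flatMap (fun c => ([] : List Int))) = [] :=
        List.flatMap_eq_nil_iff.mpr (by simp)
      simp [altGo, h0, PySem.Set.ofList]
    · rw [altGo]
      split
      · rfl
      · exact ih _ ⟨l', hmem, he⟩

-- characterisation of B's recursion: it returns a minimum of the seeded product values
theorem altGo_min : ∀ (aps : List (List Int)) (r : PySem.Set Int),
    (∀ l ∈ aps, l ≠ []) → r ≠ [] →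
    ∃ m, altGo r aps = some m ∧
      m ∈ r.flatMap (fun c => (pyProduct aps).map (fun o => o.foldl lcmI c)) ∧
      ∀ v ∈ r.flatMap (fun c => (pyProduct aps).map (fun o => o.foldl lcmI c)), m ≤ v := by
  intro aps
  induction aps with
  | nil =>
    intro r _ hr
    have hval : r.flatMap (fun c => (pyProduct []).map (fun o => o.foldl lcmI c)) = r := by
      simp [pyProduct]
    rcases hmo : PySem.List.min? r (fun v => v) with _ | m
    · exact absurd ((PySem.List.min?_eq_none_iff r _).mp hmo) hr
    · refine ⟨m, by simpa [altGo] using hmo, ?_, ?_⟩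
      · rw [hval]; exact PySem.List.min?_mem hmo
      · intro v hv
        rw [hval] at hv
        simpa using PySem.List.min?_isMin hmo v hv
  | cons opts rest ih =>
    intro r hne hr
    have hopts : opts ≠ [] := hne opts (by simp)
    rw [altGo]
    set r' := PySem.Set.ofList (r.flatMap (fun c => opts.map (fun s => altLcm c s))) with hr'def
    have hmemr' : ∀ v, v ∈ r' ↔ ∃ c ∈ r, ∃ s ∈ opts, v = lcmI c s := by
      intro v
      rw [hr'def, PySem.Set.mem_ofList]
      simp only [List.mem_flatMap, List.mem_map]
      constructor
      · rintro ⟨c, hc, s, hs, rfl⟩; exact ⟨c, hc, s, hs, altLcm_eq c s⟩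
      · rintro ⟨c, hc, s, hs, rfl⟩; exact ⟨c, hc, s, hs, altLcm_eq c s⟩
    have hr'ne : r' ≠ [] := by
      obtain ⟨c, hc⟩ := List.exists_mem_of_ne_nil r hr
      obtain ⟨s, hs⟩ := List.exists_mem_of_ne_nil opts hopts
      intro h
      have : lcmI c s ∈ r' := (hmemr' _).mpr ⟨c, hc, s, hs, rfl⟩
      simp [h] at this
    rw [if_neg hr'ne]
    obtain ⟨m, hgo, hmem, hmin⟩ := ih r' (fun u hu => hne u (by simp [hu])) hr'ne
    -- membership in the two value lists coincides
    have hval : ∀ v, (v ∈ r'.flatMap (fun c => (pyProduct rest).map (fun o => o.foldl lcmI c)))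
        ↔ (v ∈ r.flatMap (fun c => (pyProduct (opts :: rest)).map (fun o => o.foldl lcmI c))) := by
      intro v
      simp only [List.mem_flatMap, List.mem_map, pyProduct]
      constructor
      · rintro ⟨c', hc', o, ho, rfl⟩
        obtain ⟨c, hc, s, hs, rfl⟩ := (hmemr' c').mp hc'
        exact ⟨c, hc, s :: o, ⟨s, hs, o, ho, rfl⟩, rfl⟩
      · rintro ⟨c, hc, o, ho, rfl⟩
        obtain ⟨s, hs, t, ht, rfl⟩ := ho
        exact ⟨lcmI c s, (hmemr' _).mpr ⟨c, hc, s, hs, rfl⟩, t, ht, rfl⟩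
    exact ⟨m, hgo, (hval m).mp hmem, fun v hv => hmin v ((hval v).mpr hv)⟩

-- ===== VERDICT (by name: the statement is the Claim_ definition above) =====
theorem least_common_of_min_spec : Claim_equal_least_common_of_min := by
  intro aps _ hpre
  unfold Spec_least_common_of_min
  by_cases hE : ∃ l ∈ aps, l = []
  · -- some option list empty: product is empty, both return none
    rw [least_common_of_min_alt, altGo_none_of_mem_nil aps _ hE]
    simp [least_common_of_min, pyProduct_nil_of_mem_nil aps hE]
  · -- all lists nonempty; Pre_ then says no zeros anywhere
    have hne : ∀ l ∈ aps, l ≠ [] := by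
      intro l hl h; exact hE ⟨l, hl, h⟩
    have hz : ∀ l ∈ aps, ∀ s ∈ l, s ≠ 0 := by
      rcases hpre with h | h
      · exact absurd h hE
      · exact h
    -- B's side
    obtain ⟨mB, hgo, hmemB, hminB⟩ := altGo_min aps [1] hne (by simp)
    have hsetB : ∀ v, v ∈ ([1] : List Int).flatMap
        (fun c => (pyProduct aps).map (fun o => o.foldl lcmI c))
        ↔ v ∈ (pyProduct aps).map (fun o => o.foldl lcmI 1) := by
      intro v; simp
    rw [least_common_of_min_alt, show (PySem.Set.ofList [1] : PySem.Set Int) = [1] from rfl, hgo]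
    -- A's side
    have hAfold : ∀ o ∈ pyProduct aps,
        o.foldl (fun result steps => get_least_common result steps) 1 = o.foldl lcmI 1 := by
      intro o ho
      have hoz : ∀ s ∈ o, s ≠ 0 := by
        intro s hs
        obtain ⟨l, hl, hsl⟩ := mem_of_mem_pyProduct aps o ho s hs
        exact hz l hl s hsl
      exact (fold_glc_eq o hoz 1 (by omega)).1
    rcases hprod : pyProduct aps with _ | ⟨o, os⟩
    · exact absurd hprod (pyProduct_ne_nil aps hne)
    · have hmap : (o :: os).map (fun o => o.foldl lcmI 1)
          = (o :: os).map (fun o => o.foldl (fun r s => get_least_common r s) 1) := by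
        apply List.map_congr_left
        intro u hu
        exact (hAfold u (hprod ▸ hu)).symm
      -- A's fold computes min? of the mapped values
      have hA : least_common_of_min aps
          = some ((os.map (fun o => o.foldl lcmI 1)).foldl min (o.foldl lcmI 1)) := by
        rw [least_common_of_min, hprod]
        simp only [List.foldl_cons]
        rw [show (os.foldl (fun _min_steps option =>
            let result := option.foldl (fun result steps => get_least_common result steps) 1
            match _min_steps with
            | none => some result
            | some m => if result < m then some result else some m)
            (some (o.foldl (fun result steps => get_least_common result steps) 1)))
          = (os.map (fun o => o.foldl (fun r s => get_least_common r s) 1)).foldl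
              (fun acc r => match acc with
                | none => some r
                | some m => if r < m then some r else some m)
              (some (o.foldl (fun r s => get_least_common r s) 1)) from by
            rw [List.foldl_map]]
        rw [foldMin_some]
        rw [hAfold o (by simp [hprod])]
        congr 1
        have := congrArg List.tail hmap
        simp only [List.map_cons, List.tail_cons] at this
        rw [this, List.foldl_map]
      rw [hA]
      -- the value A returns is a minimum of the same value list as B's
      have hminA : ∀ v ∈ (pyProduct aps).map (fun o => o.foldl lcmI 1),
          (os.map (fun o => o.foldl lcmI 1)).foldl min (o.foldl lcmI 1) ≤ v := by
        have h1 : PySem.List.min? ((o :: os).map (fun o => o.foldl lcmI 1)) (fun v => v)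
            = some ((os.map (fun o => o.foldl lcmI 1)).foldl min (o.foldl lcmI 1)) := by
          simpa using PySem.List.min?_id_cons (o.foldl lcmI 1) (os.map (fun o => o.foldl lcmI 1))
        intro v hv
        have := PySem.List.min?_isMin h1 v (by rw [hprod] at hv; simpa using hv)
        simpa using this
      have hmemA : (os.map (fun o => o.foldl lcmI 1)).foldl min (o.foldl lcmI 1)
          ∈ (pyProduct aps).map (fun o => o.foldl lcmI 1) := by
        have h1 : PySem.List.min? ((o :: os).map (fun o => o.foldl lcmI 1)) (fun v => v)
            = some ((os.map (fun o => o.foldl lcmI 1)).foldl min (o.foldl lcmI 1)) := by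
          simpa using PySem.List.min?_id_cons (o.foldl lcmI 1) (os.map (fun o => o.foldl lcmI 1))
        rw [hprod]
        exact PySem.List.min?_mem h1
      have h1 := hminB _ ((hsetB _).mpr hmemA)
      have h2 := hminA mB ((hsetB mB).mp hmemB)
      congr 1
      omega
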